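-- pv_equiv track=rewrite | github.com/sklesde/systeme-intelligent-distribue | In512_Project_Student-main/scripts/path_list.py | _perimeter_points
-- ===== SOURCE A (Python) =====
-- from typing import List, Dict, Tuple
--
-- def _perimeter_points(x0: int, x1: int, y0: int, y1: int) -> List[Tuple[int, int]]:
--     """
--     Retourne la liste ordonnée des coordonnées du périmètre du rectangle
--     bordé par [x0..x1] x [y0..y1] (parcours horaire).
--     """
--     pts: List[Tuple[int, int]] = []
--     if x0 > x1 or y0 > y1:
--         return pts
--     # cas lignes/colonnes dégénérées
--     if y0 == y1:
--         for x in range(x0, x1 + 1):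
--             pts.append((x, y0))
--         return pts
--     if x0 == x1:
--         for y in range(y0, y1 + 1):
--             pts.append((x0, y))
--         return pts
--
--     # gauche du haut vers le bas
--     for y in range(y0, y1 + 1):
--         pts.append((x0, y))
--     # bas de gauche+1 vers droite
--     for x in range(x0 + 1, x1 + 1):
--         pts.append((x, y1))
--     # droite du bas-1 vers haut
--     for y in range(y1 - 1, y0 - 1, -1):
--         pts.append((x1, y))
--     # haut de droite-1 vers gauche+1 (évite répéter le premier point)
--     for x in range(x1 - 1, x0, -1):
--         pts.append((x, y0))
--     return pts
-- ===== SOURCE B (Python) =====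
-- def _perimeter_points(x0, x1, y0, y1):
--     """Clockwise perimeter via a single turtle walk instead of four edge loops."""
--     if x0 > x1 or y0 > y1:
--         return []
--     if y0 == y1:
--         return [(x, y0) for x in range(x0, x1 + 1)]
--     if x0 == x1:
--         return [(x0, y) for y in range(y0, y1 + 1)]
--     dirs = [(0, 1), (1, 0), (0, -1), (-1, 0)]  # down, right, up, left
--     pts = []
--     x, y, d = x0, y0, 0
--     for _ in range(2 * ((x1 - x0) + (y1 - y0))):
--         pts.append((x, y))
--         dx, dy = dirs[d]
--         if not (x0 <= x + dx <= x1 and y0 <= y + dy <= y1):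
--             d = (d + 1) % 4
--             dx, dy = dirs[d]
--         x, y = x + dx, y + dy
--     return pts
-- ===== Notes on version B (the rewrite author's own statement) =====
-- stated objective: alternative
-- what changed: Replaced A's four separate hand-written edge loops by a single clockwise turtle walk (position + direction state that turns clockwise at each corner) running for exactly the perimeter length; guards and degenerate row/column branches kept.
import Mathlib
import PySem

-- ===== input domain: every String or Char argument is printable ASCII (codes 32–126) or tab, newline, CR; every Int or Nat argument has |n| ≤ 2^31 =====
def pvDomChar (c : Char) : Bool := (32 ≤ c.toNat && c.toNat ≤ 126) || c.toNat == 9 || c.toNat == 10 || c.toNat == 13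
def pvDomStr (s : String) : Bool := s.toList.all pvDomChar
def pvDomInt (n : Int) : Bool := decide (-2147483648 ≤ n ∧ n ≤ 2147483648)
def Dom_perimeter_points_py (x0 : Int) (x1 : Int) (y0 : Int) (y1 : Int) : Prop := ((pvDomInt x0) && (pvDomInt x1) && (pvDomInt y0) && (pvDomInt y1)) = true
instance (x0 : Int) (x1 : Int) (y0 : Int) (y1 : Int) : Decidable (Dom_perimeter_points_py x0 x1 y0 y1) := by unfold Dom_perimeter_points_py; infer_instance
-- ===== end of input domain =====

-- B replaces A's four hand-written edge loops by a single clockwise turtle walk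
-- (position + direction state, turning at corners); objective: alternative decomposition.

-- ===== PORT A =====
def perimeter_points_py (x0 : Int) (x1 : Int) (y0 : Int) (y1 : Int) : List (Int × Int) :=
  let pts : List (Int × Int) := []
  if x0 > x1 ∨ y0 > y1 then pts
  else if y0 = y1 then
    (PySem.List.pyRange x0 (x1+1) 1).foldl (fun pts x => pts ++ [(x, y0)]) pts
  else if x0 = x1 then
    (PySem.List.pyRange y0 (y1+1) 1).foldl (fun pts y => pts ++ [(x0, y)]) pts
  else
    let pts := (PySem.List.pyRange y0 (y1+1) 1).foldl (fun pts y => pts ++ [(x0, y)]) pts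
    let pts := (PySem.List.pyRange (x0+1) (x1+1) 1).foldl (fun pts x => pts ++ [(x, y1)]) pts
    let pts := (PySem.List.pyRange (y1-1) (y0-1) (-1)).foldl (fun pts y => pts ++ [(x1, y)]) pts
    (PySem.List.pyRange (x1-1) x0 (-1)).foldl (fun pts x => pts ++ [(x, y0)]) pts

-- ===== PORT B =====
-- dirs = [(0,1),(1,0),(0,-1),(-1,0)]  (down, right, up, left)
def pvDirs : List (Int × Int) := [(0,1), (1,0), (0,-1), (-1,0)]

-- the body of B's counted loop; the loop counter `range(2*((x1-x0)+(y1-y0)))` is the fuel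
def pvWalk (x0 : Int) (x1 : Int) (y0 : Int) (y1 : Int) : Int → Int → Nat → Nat → List (Int × Int)
  | _, _, _, 0 => []
  | x, y, d, fuel+1 =>
    let p := pvDirs.getD d (0, 0)
    let d' := if ¬ (x0 ≤ x + p.1 ∧ x + p.1 ≤ x1 ∧ y0 ≤ y + p.2 ∧ y + p.2 ≤ y1)
              then (d + 1) % 4 else d
    let q := pvDirs.getD d' (0, 0)
    (x, y) :: pvWalk x0 x1 y0 y1 (x + q.1) (y + q.2) d' fuel

def perimeter_points_py_alt (x0 : Int) (x1 : Int) (y0 : Int) (y1 : Int) : List (Int × Int) :=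
  if x0 > x1 ∨ y0 > y1 then []
  else if y0 = y1 then (PySem.List.pyRange x0 (x1+1) 1).map (fun x => (x, y0))
  else if x0 = x1 then (PySem.List.pyRange y0 (y1+1) 1).map (fun y => (x0, y))
  else pvWalk x0 x1 y0 y1 x0 y0 0 (2 * ((x1 - x0) + (y1 - y0))).toNat

-- ===== PRECONDITION & SPEC =====
def Spec_perimeter_points_py (x0 : Int) (x1 : Int) (y0 : Int) (y1 : Int) (out : List (Int × Int)) : Prop := out = perimeter_points_py_alt x0 x1 y0 y1
instance (x0 : Int) (x1 : Int) (y0 : Int) (y1 : Int) (out : List (Int × Int)) : Decidable (Spec_perimeter_points_py x0 x1 y0 y1 out) := by unfold Spec_perimeter_points_py; infer_instance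

-- ===== CLAIM (what is proved, stated in full; the proofs are below) =====
def Claim_equal_perimeter_points_py : Prop := ∀ (x0 : Int) (x1 : Int) (y0 : Int) (y1 : Int), Dom_perimeter_points_py x0 x1 y0 y1 → Spec_perimeter_points_py x0 x1 y0 y1 (perimeter_points_py x0 x1 y0 y1)

-- ===== LEMMAS AND PROOFS =====

-- left edge: from (x0, y) heading down, emit (x0,y)…(x0,y1), turn right at the corner
theorem pvWalk_left (x0 x1 y0 y1 : Int) (hx : x0 < x1) (hy : y0 < y1) :
    ∀ (k : Nat) (y : Int) (f : Nat), y + k = y1 → y0 ≤ y →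
    pvWalk x0 x1 y0 y1 x0 y 0 (f + (k+1)) =
      (PySem.List.pyRange y (y1+1) 1).map (fun v => (x0, v)) ++ pvWalk x0 x1 y0 y1 (x0+1) y1 1 f := by
  intro k
  induction k with
  | zero =>
    intro y f hk _
    have hy1 : y = y1 := by omega
    subst hy1
    rw [pvWalk]
    rw [if_pos (by simp [pvDirs]; try omega)]
    simp [pvDirs, PySem.List.pyRange_one_singleton]
  | succ k ih =>
    intro y f hk hy0
    have hlt : y < y1 := by omega
    rw [show f + (k+1+1) = (f + (k+1)) + 1 from rfl, pvWalk]
    rw [if_neg (by simp [pvDirs]; try omega)]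
    rw [PySem.List.pyRange_one_cons (by omega : y < y1 + 1)]
    simp only [pvDirs, List.getD, List.map_cons, List.cons_append]
    have := ih (y + 1) f (by omega) (by omega)
    simp [this]

-- bottom edge: from (x, y1) heading right, emit (x,y1)…(x1,y1), turn up at the corner
theorem pvWalk_bottom (x0 x1 y0 y1 : Int) (hx : x0 < x1) (hy : y0 < y1) :
    ∀ (k : Nat) (x : Int) (f : Nat), x + k = x1 → x0 < x →
    pvWalk x0 x1 y0 y1 x y1 1 (f + (k+1)) =
      (PySem.List.pyRange x (x1+1) 1).map (fun u => (u, y1)) ++ pvWalk x0 x1 y0 y1 x1 (y1-1) 2 f := by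
  intro k
  induction k with
  | zero =>
    intro x f hk _
    have hx1 : x = x1 := by omega
    subst hx1
    rw [pvWalk]
    rw [if_pos (by simp [pvDirs]; try omega)]
    simp [pvDirs, PySem.List.pyRange_one_singleton, sub_eq_add_neg]
  | succ k ih =>
    intro x f hk hx0
    rw [show f + (k+1+1) = (f + (k+1)) + 1 from rfl, pvWalk]
    rw [if_neg (by simp [pvDirs]; try omega)]
    rw [PySem.List.pyRange_one_cons (by omega : x < x1 + 1)]
    simp only [pvDirs, List.getD, List.map_cons, List.cons_append]
    have := ih (x + 1) f (by omega) (by omega)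
    simp only [sub_eq_add_neg] at this ⊢
    simp [this]

-- right edge: from (x1, y) heading up, emit (x1,y)…(x1,y0), turn left at the corner
theorem pvWalk_right (x0 x1 y0 y1 : Int) (hx : x0 < x1) (hy : y0 < y1) :
    ∀ (k : Nat) (y : Int) (f : Nat), y0 + k = y → y ≤ y1 →
    pvWalk x0 x1 y0 y1 x1 y 2 (f + (k+1)) =
      (PySem.List.pyRange y (y0-1) (-1)).map (fun v => (x1, v)) ++ pvWalk x0 x1 y0 y1 (x1-1) y0 3 f := by
  intro k
  induction k with
  | zero =>
    intro y f hk _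
    have hy0 : y = y0 := by omega
    subst hy0
    rw [pvWalk]
    rw [if_pos (by simp [pvDirs]; try omega)]
    rw [PySem.List.pyRange_neg_one_cons (by omega : y - 1 < y)]
    rw [PySem.List.pyRange_neg_one_eq_nil (by omega : y - 1 ≤ y - 1)]
    simp [pvDirs, sub_eq_add_neg]
  | succ k ih =>
    intro y f hk hle
    rw [show f + (k+1+1) = (f + (k+1)) + 1 from rfl, pvWalk]
    rw [if_neg (by simp [pvDirs]; try omega)]
    rw [PySem.List.pyRange_neg_one_cons (by omega : y0 - 1 < y)]
    simp only [pvDirs, List.getD, List.map_cons, List.cons_append]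
    have := ih (y - 1) f (by omega) (by omega)
    simp only [sub_eq_add_neg] at this ⊢
    simp [this]

-- top edge: from (x, y0) heading left, emit (x,y0)…(x0+1,y0); the fuel runs out exactly there
theorem pvWalk_top (x0 x1 y0 y1 : Int) (hx : x0 < x1) (hy : y0 < y1) :
    ∀ (k : Nat) (x : Int), x = x0 + k → x ≤ x1 - 1 →
    pvWalk x0 x1 y0 y1 x y0 3 k = (PySem.List.pyRange x x0 (-1)).map (fun u => (u, y0)) := by
  intro k
  induction k with
  | zero =>
    intro x hk _
    have : x = x0 := by omega
    subst this
    rw [pvWalk, PySem.List.pyRange_neg_one_eq_nil (by omega : x ≤ x)]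
    simp
  | succ k ih =>
    intro x hk hle
    rw [pvWalk]
    rw [if_neg (by simp [pvDirs]; try omega)]
    rw [PySem.List.pyRange_neg_one_cons (by omega : x0 < x)]
    simp only [pvDirs, List.getD, List.map_cons]
    have := ih (x - 1) (by omega) (by omega)
    simp only [sub_eq_add_neg] at this ⊢
    simp [this]

-- the whole walk in the non-degenerate case = A's four edges concatenated
theorem pvWalk_eq (x0 x1 y0 y1 : Int) (hx : x0 < x1) (hy : y0 < y1) :
    pvWalk x0 x1 y0 y1 x0 y0 0 (2 * ((x1 - x0) + (y1 - y0))).toNat =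
      (PySem.List.pyRange y0 (y1+1) 1).map (fun v => (x0, v)) ++
      ((PySem.List.pyRange (x0+1) (x1+1) 1).map (fun u => (u, y1)) ++
      ((PySem.List.pyRange (y1-1) (y0-1) (-1)).map (fun v => (x1, v)) ++
       (PySem.List.pyRange (x1-1) x0 (-1)).map (fun u => (u, y0)))) := by
  set dx : Nat := (x1 - x0).toNat with hdx
  set dy : Nat := (y1 - y0).toNat with hdy
  have hdx1 : (dx : Int) = x1 - x0 := by omega
  have hdy1 : (dy : Int) = y1 - y0 := by omega
  have hfuel : (2 * ((x1 - x0) + (y1 - y0))).toNat = ((dx - 1) + ((dy-1)+1) + ((dx-1)+1)) + (dy + 1) := by omega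
  rw [hfuel]
  rw [pvWalk_left x0 x1 y0 y1 hx hy dy y0 _ (by omega) le_rfl]
  rw [pvWalk_bottom x0 x1 y0 y1 hx hy (dx - 1) (x0+1) _ (by omega) (by omega)]
  rw [pvWalk_right x0 x1 y0 y1 hx hy (dy - 1) (y1-1) _ (by omega) (by omega)]
  rw [pvWalk_top x0 x1 y0 y1 hx hy (dx - 1) (x1-1) (by omega) (by omega)]

-- ===== VERDICT (by name: the statement is the Claim_ definition above) =====
theorem perimeter_points_py_spec : Claim_equal_perimeter_points_py := by
  intro x0 x1 y0 y1 _
  unfold Spec_perimeter_points_py perimeter_points_py perimeter_points_py_alt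
  split_ifs with h1 h2 h3
  · rfl
  · simp only [PySem.List.foldl_append_singleton_eq_map, List.nil_append]
  · simp only [PySem.List.foldl_append_singleton_eq_map, List.nil_append]
  · simp only [PySem.List.foldl_append_singleton_eq_map, List.nil_append, List.append_assoc]
    rw [pvWalk_eq x0 x1 y0 y1 (by omega) (by omega)]
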